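-- pv_equiv track=rewrite | github.com/AnkitAvi11/Data-Structures-And-Algorithms | Matrix/diagonal.py | is_lower_triangle_matrix
-- ===== SOURCE A (Python) =====
-- def is_lower_triangle_matrix(arr) :
--
--     for i in range(len(arr)) :
--         for j in range(len(arr[i])) :
--             if j > i :
--                 if arr[i][j] != 0 :
--                     return False
--
--             else :
--                 if arr[i][j] == 0 :
--                     return False
--
--
--     return True
-- ===== SOURCE B (Python) =====
-- def is_lower_triangle_matrix(arr):
--     # Peel off the first row and first column and recurse on the submatrix:
--     # row 0 must be one nonzero entry followed by zeros (or empty), every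
--     # remaining row must start with a nonzero entry (or be empty), and the
--     # rest of the matrix with its first column removed must itself pass.
--     if not arr:
--         return True
--     head, tail = arr[0], arr[1:]
--     if head and not (head[0] != 0 and all(x == 0 for x in head[1:])):
--         return False
--     if any(r and r[0] == 0 for r in tail):
--         return False
--     return is_lower_triangle_matrix([r[1:] for r in tail])
-- ===== Notes on version B (the rewrite author's own statement) =====
-- stated objective: alternative
-- what changed: Replaces A's doubly indexed loop (j>i branch per element) with an index-free recursive peeling: validate the first row and the first entries of the remaining rows, strip the first row and first column, and recurse on the submatrix.
import Mathlib
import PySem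

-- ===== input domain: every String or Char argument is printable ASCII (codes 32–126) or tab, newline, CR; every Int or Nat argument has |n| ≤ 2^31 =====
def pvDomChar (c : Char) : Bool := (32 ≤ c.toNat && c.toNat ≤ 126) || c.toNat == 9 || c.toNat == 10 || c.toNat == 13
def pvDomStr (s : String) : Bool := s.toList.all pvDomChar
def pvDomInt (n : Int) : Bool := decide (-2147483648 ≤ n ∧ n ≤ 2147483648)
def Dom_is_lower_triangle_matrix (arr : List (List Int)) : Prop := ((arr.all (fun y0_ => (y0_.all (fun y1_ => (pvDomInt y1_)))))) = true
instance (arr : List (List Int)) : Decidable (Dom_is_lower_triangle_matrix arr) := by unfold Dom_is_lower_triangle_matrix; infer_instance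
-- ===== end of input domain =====

-- B replaces A's doubly indexed element loop by an index-free recursion that peels the first row and first column off the matrix; return values agree everywhere.
-- ===== PORT A =====
-- inner loop: 'for j in range(len(row))' walking row with j the index of the current head; 'return False' short-circuits
def aLoopJ (i j : Nat) : List Int → Bool
  | [] => true
  | x :: xs =>
    if j > i then
      if x ≠ 0 then false else aLoopJ i (j+1) xs
    else
      if x = 0 then false else aLoopJ i (j+1) xs

-- outer loop: 'for i in range(len(arr))', a False from the inner loop returns from the whole function
def aLoopI (i : Nat) : List (List Int) → Bool
  | [] => true
  | row :: rest => if aLoopJ i 0 row then aLoopI (i+1) rest else false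

def is_lower_triangle_matrix (arr : List (List Int)) : Bool := aLoopI 0 arr

-- ===== PORT B =====
-- 'head and not (head[0] != 0 and all(x == 0 for x in head[1:]))': head row ok?
def bHead : List Int → Bool
  | [] => true
  | x :: xs => x != 0 && xs.all (fun y => y == 0)

-- 'not any(r and r[0] == 0 for r in tail)': every remaining row is empty or starts nonzero
def bFirsts (tail : List (List Int)) : Bool :=
  tail.all (fun r => match r with | [] => true | x :: _ => x != 0)

def is_lower_triangle_matrix_alt (arr : List (List Int)) : Bool :=
  match arr with
  | [] => true
  | head :: tail =>
    if !bHead head then false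
    else if !bFirsts tail then false
    else is_lower_triangle_matrix_alt (tail.map (fun r => r.drop 1))
termination_by arr.length
decreasing_by simp

-- ===== PRECONDITION & SPEC =====
def Spec_is_lower_triangle_matrix (arr : List (List Int)) (out : Bool) : Prop := out = is_lower_triangle_matrix_alt arr
instance (arr : List (List Int)) (out : Bool) : Decidable (Spec_is_lower_triangle_matrix arr out) := by unfold Spec_is_lower_triangle_matrix; infer_instance

-- ===== CLAIM (what is proved, stated in full; the proofs are below) =====
def Claim_equal_is_lower_triangle_matrix : Prop := ∀ (arr : List (List Int)), Dom_is_lower_triangle_matrix arr → Spec_is_lower_triangle_matrix arr (is_lower_triangle_matrix arr)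

-- ===== LEMMAS AND PROOFS =====

-- proof-side characterisation: row at diagonal index i must have a nonzero (i+1)-prefix and a zero suffix
def rowCond (i : Nat) (row : List Int) : Bool :=
  ((row.take (i+1)).all (fun x => x != 0)) && ((row.drop (i+1)).all (fun x => x == 0))

def pvSpec (i : Nat) : List (List Int) → Bool
  | [] => true
  | r :: rest => rowCond i r && pvSpec (i+1) rest

-- past the diagonal (j > i) A's inner loop just demands every remaining entry be zero
lemma aLoopJ_past (i : Nat) : ∀ (row : List Int) (j : Nat), j > i →
    aLoopJ i j row = row.all (fun x => x == 0) := by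
  intro row
  induction row with
  | nil => intro j _; rfl
  | cons x xs ih =>
    intro j hj
    simp only [aLoopJ, List.all_cons, if_pos hj]
    by_cases hx : x = 0
    · simp [hx, ih (j+1) (Nat.lt_succ_of_lt hj)]
    · simp [hx]

-- inner-loop characterisation: at offset j ≤ i+1 the rest of the loop is a
-- (i+1-j)-long nonzero scan followed by a zero scan
lemma aLoopJ_eq (i : Nat) : ∀ (row : List Int) (j : Nat), j ≤ i + 1 →
    aLoopJ i j row =
      (((row.take (i+1-j)).all (fun x => x != 0)) &&
       ((row.drop (i+1-j)).all (fun x => x == 0))) := by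
  intro row
  induction row with
  | nil => intro j _; simp [aLoopJ]
  | cons x xs ih =>
    intro j hj
    rcases Nat.lt_or_ge j (i+1) with h | h
    · have hni : ¬ j > i := by omega
      have htk : i + 1 - j = (i + 1 - (j+1)) + 1 := by omega
      simp only [aLoopJ, if_neg hni, htk, List.take_succ_cons, List.drop_succ_cons,
        List.all_cons]
      by_cases hx : x = 0
      · simp [hx]
      · have hxb : (x == (0:Int)) = false := by simpa using hx
        simp only [ih (j+1) (by omega), hxb, bne, Bool.not_false, Bool.true_and,
          if_neg hx]
    · have hj' : j = i + 1 := by omega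
      have : i + 1 - j = 0 := by omega
      rw [this]
      simp only [List.take_zero, List.drop_zero, List.all_nil, Bool.true_and]
      exact aLoopJ_past i (x :: xs) j (by omega)

lemma aLoopJ_zero (i : Nat) (row : List Int) : aLoopJ i 0 row = rowCond i row := by
  have := aLoopJ_eq i row 0 (by omega)
  simpa [rowCond] using this

lemma aLoopI_eq_spec : ∀ (arr : List (List Int)) (i : Nat), aLoopI i arr = pvSpec i arr := by
  intro arr
  induction arr with
  | nil => intro i; rfl
  | cons row rest ih =>
    intro i
    simp only [aLoopI, pvSpec, aLoopJ_zero, ih]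
    by_cases h : rowCond i row <;> simp [h]

-- shifting the diagonal down one step = checking first entries and dropping the first column
lemma rowCond_succ (i : Nat) (r : List Int) :
    rowCond (i+1) r =
      ((match r with | [] => true | x :: _ => x != 0) && rowCond i (r.drop 1)) := by
  cases r with
  | nil => simp [rowCond]
  | cons x xs =>
    simp only [rowCond, List.take_succ_cons, List.drop_succ_cons, List.all_cons]
    cases hx : (x != 0) <;> simp

lemma pvSpec_succ : ∀ (rest : List (List Int)) (i : Nat),
    pvSpec (i+1) rest = (bFirsts rest && pvSpec i (rest.map (fun r => r.drop 1))) := by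
  intro rest
  induction rest with
  | nil => intro i; rfl
  | cons r rs ih =>
    intro i
    simp only [pvSpec, bFirsts, List.all_cons, List.map_cons, rowCond_succ, ih]
    show _ = ((_ && rs.all _) && (_ && _))
    cases (match r with | [] => true | x :: _ => x != 0) <;>
      cases rowCond i (r.drop 1) <;>
      cases rs.all (fun r => match r with | [] => true | x :: _ => x != 0) <;> simp

lemma bHead_eq_rowCond (r : List Int) : bHead r = rowCond 0 r := by
  cases r with
  | nil => rfl
  | cons x xs => simp [bHead, rowCond]

lemma alt_eq_spec : ∀ (n : Nat) (arr : List (List Int)), arr.length ≤ n →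
    is_lower_triangle_matrix_alt arr = pvSpec 0 arr := by
  intro n
  induction n with
  | zero =>
    intro arr h
    have : arr = [] := by cases arr <;> simp_all
    subst this; simp [is_lower_triangle_matrix_alt, pvSpec]
  | succ n ih =>
    intro arr h
    cases arr with
    | nil => simp [is_lower_triangle_matrix_alt, pvSpec]
    | cons head tail =>
      rw [is_lower_triangle_matrix_alt.eq_def]
      have hrec := ih (tail.map (fun r => r.drop 1)) (by simp at h ⊢; omega)
      simp only [pvSpec, ← bHead_eq_rowCond, pvSpec_succ, hrec]
      cases bHead head <;> cases bFirsts tail <;> simp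

-- ===== VERDICT (by name: the statement is the Claim_ definition above) =====
theorem is_lower_triangle_matrix_spec : Claim_equal_is_lower_triangle_matrix := by
  intro arr _
  unfold Spec_is_lower_triangle_matrix is_lower_triangle_matrix
  rw [aLoopI_eq_spec, alt_eq_spec arr.length arr (le_refl _)]
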